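-- pv_equiv track=rewrite | github.com/ilteris1/Google-Maps-Scraper | main.py | group_by_phone
-- ===== SOURCE A (Python) =====
-- def group_by_phone(data):
--     """Group results by phone number - Yandex rows come after Google rows with same phone"""
--     phone_map = {}
--     no_phone = []
--
--     for item in data:
--         phone = item.get('phone')
--         if phone:
--             if phone not in phone_map:
--                 phone_map[phone] = []
--             phone_map[phone].append(item)
--         else:
--             no_phone.append(item)
--
--     # Sort each phone group: Google first, then Yandex
--     result = []
--     for phone, items in phone_map.items():
--         items.sort(key=lambda x: 0 if x['source'] == 'Google' else 1)
--         result.extend(items)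
--
--     result.extend(no_phone)
--     return result
-- ===== SOURCE B (Python) =====
-- def group_by_phone(data):
--     """Group results by phone number - Yandex rows come after Google rows with same phone"""
--     phones = list(dict.fromkeys(p for p in (item.get('phone') for item in data) if p))
--     result = []
--     for p in phones:
--         group = [x for x in data if x.get('phone') == p]
--         result += [x for x in group if x['source'] == 'Google']
--         result += [x for x in group if x['source'] != 'Google']
--     result += [x for x in data if not x.get('phone')]
--     return result
-- ===== Notes on version B (the rewrite author's own statement) =====
-- stated objective: alternative
-- what changed: Replaces A's dict-of-lists accumulation plus per-group stable sort by a 0/1 key with a dedup of first-seen truthy phones followed by per-phone filter passes (Google filter, then non-Google filter) over the data.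
import Mathlib
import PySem

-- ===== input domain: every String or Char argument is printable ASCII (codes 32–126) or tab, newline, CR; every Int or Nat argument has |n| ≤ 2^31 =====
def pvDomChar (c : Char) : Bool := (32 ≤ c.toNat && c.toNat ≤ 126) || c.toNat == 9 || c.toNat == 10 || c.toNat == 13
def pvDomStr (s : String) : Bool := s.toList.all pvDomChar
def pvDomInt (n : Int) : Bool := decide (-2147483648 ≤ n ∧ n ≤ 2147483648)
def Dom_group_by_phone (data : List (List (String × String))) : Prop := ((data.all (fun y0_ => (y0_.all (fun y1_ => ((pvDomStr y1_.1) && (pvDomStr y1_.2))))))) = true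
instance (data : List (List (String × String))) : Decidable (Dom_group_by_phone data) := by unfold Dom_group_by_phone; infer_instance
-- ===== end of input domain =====

-- B replaces A's dict-of-lists accumulation and per-group stable sort with a dedup of
-- first-seen truthy phones followed by per-phone filter passes (alternative decomposition,
-- no speed claim). Equivalence of the RETURN values on Pre_ (items with a truthy phone
-- must carry a 'source' key; otherwise both Pythons raise KeyError).

-- ===== PORT A =====
-- item.get(k) on the dict `item` (assoc list, first match)
def pvItemGet (item : List (String × String)) (k : String) : Option String :=
  (PySem.Dict.mk item).get? k

-- Python truthiness of `item.get('phone')`: None and '' are falsy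
def pvTruthy (o : Option String) : Bool :=
  match o with
  | some s => decide (s ≠ "")
  | none => false

-- x['source'] == 'Google' ported via getD ""; exact when 'source' is present (Pre_);
-- Python raises KeyError when it is absent.
def pvKeyGoogle (x : List (String × String)) : Bool :=
  (PySem.Dict.mk x).getD "source" "" == "Google"

def group_by_phone (data : List (List (String × String))) : List (List (String × String)) :=
  -- for item in data: build phone_map / no_phone
  let st := data.foldl
    (fun (st : PySem.Dict String (List (List (String × String))) × List (List (String × String))) item =>
      let phone := pvItemGet item "phone"
      if pvTruthy phone then
        let p := phone.getD ""
        -- if phone not in phone_map: phone_map[phone] = []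
        let pm := if st.1.contains p then st.1 else st.1.insert p []
        -- phone_map[phone].append(item)
        (pm.modify p [] (· ++ [item]), st.2)
      else
        (st.1, st.2 ++ [item]))
    (PySem.Dict.mk [], [])
  -- for phone, items in phone_map.items(): items.sort(key=…); result.extend(items)
  let result := st.1.items.foldl
    (fun res pr =>
      res ++ PySem.List.sorted pr.2 (fun x => if pvKeyGoogle x then (0 : Int) else 1) false) []
  result ++ st.2

-- ===== PORT B =====
def group_by_phone_alt (data : List (List (String × String))) : List (List (String × String)) :=
  -- phones = list(dict.fromkeys(p for p in (item.get('phone') for item in data) if p))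
  let phones := PySem.List.dedup
    ((data.map (fun item => pvItemGet item "phone")).filter pvTruthy |>.filterMap id)
  let result := phones.foldl
    (fun res p =>
      let group := data.filter (fun x => pvItemGet x "phone" == some p)
      res ++ group.filter (fun x => pvKeyGoogle x)
          ++ group.filter (fun x => !pvKeyGoogle x)) []
  result ++ data.filter (fun x => !pvTruthy (pvItemGet x "phone"))

-- ===== PRECONDITION & SPEC =====
-- Pre_ excludes exactly the inputs on which both Pythons raise KeyError: an item whose
-- 'phone' is truthy but which has no 'source' key.
def Pre_group_by_phone (data : List (List (String × String))) : Prop :=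
  ∀ item ∈ data, pvTruthy (pvItemGet item "phone") = true → (pvItemGet item "source").isSome = true
instance (data : List (List (String × String))) : Decidable (Pre_group_by_phone data) := by
  unfold Pre_group_by_phone; infer_instance

def pvWitness_group_by_phone : (List (List (String × String))) :=
  [[("phone", "1"), ("source", "Yandex")], [("phone", "1"), ("source", "Google")], [("name", "a")]]

def Spec_group_by_phone (data : List (List (String × String))) (out : List (List (String × String))) : Prop := out = group_by_phone_alt data
instance (data : List (List (String × String))) (out : List (List (String × String))) : Decidable (Spec_group_by_phone data out) := by unfold Spec_group_by_phone; infer_instance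

-- ===== CLAIM (what is proved, stated in full; the proofs are below) =====
def Claim_equal_group_by_phone : Prop := ∀ (data : List (List (String × String))), Dom_group_by_phone data → Pre_group_by_phone data → Spec_group_by_phone data (group_by_phone data)


-- ===== LEMMAS AND PROOFS =====

-- abbreviations used only by the proofs
-- the pm-component of A's loop step
def pvStep (pm : PySem.Dict String (List (List (String × String)))) (item : List (String × String)) :
    PySem.Dict String (List (List (String × String))) :=
  let phone := pvItemGet item "phone"
  if pvTruthy phone then
    let p := phone.getD ""
    let pm1 := if pm.contains p then pm else pm.insert p []
    pm1.modify p [] (· ++ [item])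
  else pm

def pvPhones (data : List (List (String × String))) : List String :=
  PySem.List.dedup ((data.map (fun item => pvItemGet item "phone")).filter pvTruthy |>.filterMap id)

def pvGrp (data : List (List (String × String))) (p : String) : List (List (String × String)) :=
  data.filter (fun x => pvItemGet x "phone" == some p)

-- A's paired fold splits into the pm-fold and a filter for no_phone
theorem pvFoldSplit (data : List (List (String × String)))
    (pm : PySem.Dict String (List (List (String × String)))) (np : List (List (String × String))) :
    data.foldl
      (fun (st : PySem.Dict String (List (List (String × String))) × List (List (String × String))) item =>
        let phone := pvItemGet item "phone"
        if pvTruthy phone then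
          let p := phone.getD ""
          let pm := if st.1.contains p then st.1 else st.1.insert p []
          (pm.modify p [] (· ++ [item]), st.2)
        else
          (st.1, st.2 ++ [item])) (pm, np)
      = (data.foldl pvStep pm, np ++ data.filter (fun x => !pvTruthy (pvItemGet x "phone"))) := by
  induction data generalizing pm np with
  | nil => simp
  | cons x xs ih =>
    simp only [List.foldl_cons, List.filter_cons]
    by_cases h : pvTruthy (pvItemGet x "phone") = true
    · simp [h, pvStep, ih]
    · simp only [Bool.not_eq_true] at h
      simp [h, pvStep, ih]

-- members of pvPhones are truthy strings
theorem pvPhones_ne_empty (data : List (List (String × String))) (p : String)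
    (h : p ∈ pvPhones data) : p ≠ "" := by
  unfold pvPhones at h
  rw [PySem.List.mem_dedup] at h
  obtain ⟨o, ho, hid⟩ := List.mem_filterMap.mp h
  obtain ⟨ho1, ho2⟩ := List.mem_filter.mp ho
  subst hid
  simpa [pvTruthy] using ho2

-- a phone absent from pvPhones has an empty group
theorem pvGrp_nil_of_not_mem (data : List (List (String × String))) (q : String) (hq : q ≠ "")
    (h : q ∉ pvPhones data) : pvGrp data q = [] := by
  unfold pvGrp
  rw [List.filter_eq_nil_iff]
  intro x hx hq2
  apply h
  unfold pvPhones
  rw [PySem.List.mem_dedup]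
  refine List.mem_filterMap.mpr ⟨some q, List.mem_filter.mpr ⟨?_, ?_⟩, rfl⟩
  · exact List.mem_map.mpr ⟨x, hx, by simpa using hq2⟩
  · simpa [pvTruthy] using hq

-- first-match lookup on an association list built by map
theorem pvFind_map_assoc {β : Type} (l : List String) (g : String → β) (q : String) (h : q ∈ l) :
    List.find? (fun pr => pr.1 == q) (l.map (fun p => (p, g p))) = some (q, g q) := by
  induction l with
  | nil => simp at h
  | cons a l ih =>
    by_cases hab : a = q
    · subst hab; simp
    · have hne : (a == q) = false := by simpa using hab
      have hq : q ∈ l := by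
        rcases List.mem_cons.mp h with h1 | h1
        · exact absurd h1.symm hab
        · exact h1
      simp [hne, ih hq]

theorem pvFind_map_assoc_none {β : Type} (l : List String) (g : String → β) (q : String) (h : q ∉ l) :
    List.find? (fun pr => pr.1 == q) (l.map (fun p => (p, g p))) = none := by
  rw [List.find?_eq_none]
  rintro ⟨p, v⟩ hm
  obtain ⟨p', hp', heq⟩ := List.mem_map.mp hm
  cases heq
  intro hc
  rw [beq_iff_eq] at hc
  exact h (hc ▸ hp')

theorem pvDedup_append_singleton {α : Type} [BEq α] (l : List α) (a : α) :
    PySem.List.dedup (l ++ [a]) = PySem.Set.add (PySem.List.dedup l) a := by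
  simp [PySem.List.dedup, PySem.Set.ofList_eq_foldl, List.foldl_append]

theorem pvPhones_append_truthy (xs : List (List (String × String))) (y : List (String × String))
    (q : String) (hy : pvItemGet y "phone" = some q) (hq : q ≠ "") :
    pvPhones (xs ++ [y]) = PySem.Set.add (pvPhones xs) q := by
  unfold pvPhones
  rw [List.map_append, List.filter_append, List.filterMap_append]
  simp only [List.map_cons, List.map_nil, hy]
  rw [show List.filter pvTruthy [some q] = [some q] by simp [pvTruthy, hq]]
  simp only [List.filterMap_cons, List.filterMap_nil, id]
  exact pvDedup_append_singleton _ q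

theorem pvPhones_append_falsy (xs : List (List (String × String))) (y : List (String × String))
    (hy : pvTruthy (pvItemGet y "phone") = false) :
    pvPhones (xs ++ [y]) = pvPhones xs := by
  unfold pvPhones
  rw [List.map_append, List.filter_append]
  simp [hy]

theorem pvGrp_append (xs : List (List (String × String))) (y : List (String × String)) (p : String) :
    pvGrp (xs ++ [y]) p
      = pvGrp xs p ++ if pvItemGet y "phone" == some p then [y] else [] := by
  unfold pvGrp
  rw [List.filter_append]
  congr 1
  by_cases h : (pvItemGet y "phone" == some p) = true <;> simp [h]

theorem pvMatch_falsy (y : List (String × String)) (p : String) (hp : p ≠ "")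
    (hy : pvTruthy (pvItemGet y "phone") = false) :
    (pvItemGet y "phone" == some p) = false := by
  cases h : pvItemGet y "phone" with
  | none => rfl
  | some s =>
    rw [h] at hy
    simp only [pvTruthy, decide_eq_false_iff_not, not_not] at hy
    subst hy
    simp only [beq_eq_false_iff_ne, ne_eq, Option.some.injEq]
    rintro rfl
    exact hp rfl

theorem pvContains_map {β : Type} (l : List String) (g : String → β) (q : String) :
    (PySem.Dict.mk (l.map (fun p => (p, g p)))).contains q = decide (q ∈ l) := by
  by_cases h : q ∈ l
  · simp only [h, decide_true]
    exact List.any_eq_true.mpr ⟨(q, g q), List.mem_map.mpr ⟨q, h, rfl⟩, by simp⟩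
  · simp only [h, decide_false, PySem.Dict.contains]
    rw [List.any_eq_false]
    rintro ⟨p, v⟩ hm
    obtain ⟨p', hp', heq⟩ := List.mem_map.mp hm
    cases heq
    intro hc
    rw [beq_iff_eq] at hc
    exact h (hc ▸ hp')

theorem pvItems_insert_of_contains {κ ν : Type} [BEq κ] (d : PySem.Dict κ ν) (k : κ) (v : ν)
    (h : d.contains k = true) :
    (d.insert k v).items = d.items.map (fun pr => if pr.1 == k then (k, v) else pr) := by
  simp [PySem.Dict.insert, h]

theorem pvItems_insert_of_not_contains {κ ν : Type} [BEq κ] (d : PySem.Dict κ ν) (k : κ) (v : ν)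
    (h : d.contains k = false) :
    (d.insert k v).items = d.items ++ [(k, v)] := by
  simp [PySem.Dict.insert, h]

-- the dict after A's loop: first-seen phones, each with its filtered group
theorem pvItemsLem (data : List (List (String × String))) :
    (data.foldl pvStep (PySem.Dict.mk [])).items
      = (pvPhones data).map (fun p => (p, pvGrp data p)) := by
  induction data using List.reverseRecOn with
  | nil => rfl
  | append_singleton xs y ih =>
    rw [List.foldl_append, List.foldl_cons, List.foldl_nil]
    by_cases hty : pvTruthy (pvItemGet y "phone") = true
    · -- y has a truthy phone q
      obtain ⟨q, hq, hqne⟩ : ∃ q, pvItemGet y "phone" = some q ∧ q ≠ "" := by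
        cases h : pvItemGet y "phone" with
        | none => rw [h] at hty; exact absurd hty (by simp [pvTruthy])
        | some s =>
          rw [h] at hty
          exact ⟨s, rfl, by simpa [pvTruthy] using hty⟩
      have hstep : pvStep (xs.foldl pvStep (PySem.Dict.mk [])) y
          = (if (xs.foldl pvStep (PySem.Dict.mk [])).contains q then xs.foldl pvStep (PySem.Dict.mk [])
             else (xs.foldl pvStep (PySem.Dict.mk [])).insert q []).modify q [] (· ++ [y]) := by
        have hty2 : pvTruthy (some q) = true := hq ▸ hty
        simp [pvStep, hq, hty2]
      rw [hstep]
      rw [pvPhones_append_truthy xs y q hq hqne]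
      rw [show ∀ (d : PySem.Dict String (List (List (String × String)))) k f,
            d.modify k [] f = d.insert k (f (d.getD k [])) from fun _ _ _ => rfl]
      by_cases hmem : q ∈ pvPhones xs
      · -- phone already seen: modify appends y to its group
        have hcont : (xs.foldl pvStep (PySem.Dict.mk [])).contains q = true := by
          rw [show (xs.foldl pvStep (PySem.Dict.mk [])) = PySem.Dict.mk ((pvPhones xs).map (fun p => (p, pvGrp xs p))) from congrArg PySem.Dict.mk ih]
          rw [pvContains_map]; simpa
        rw [if_pos hcont]
        have hget : (xs.foldl pvStep (PySem.Dict.mk [])).getD q [] = pvGrp xs q := by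
          rw [show (xs.foldl pvStep (PySem.Dict.mk [])) = PySem.Dict.mk ((pvPhones xs).map (fun p => (p, pvGrp xs p))) from congrArg PySem.Dict.mk ih]
          simp [PySem.Dict.getD, PySem.Dict.get?, pvFind_map_assoc _ _ _ hmem]
        rw [hget, pvItems_insert_of_contains _ _ _ hcont, ih, List.map_map]
        rw [show PySem.Set.add (pvPhones xs) q = pvPhones xs by
          simp [PySem.Set.add, PySem.Set.contains, hmem]]
        apply List.map_congr_left
        intro p hp
        simp only [Function.comp_apply]
        by_cases hpq : p = q
        · subst hpq
          rw [if_pos (by simp)]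
          rw [pvGrp_append, hq, if_pos (by simp)]
        · rw [if_neg (by simpa using hpq)]
          rw [pvGrp_append, hq, if_neg (by simpa using fun hc => hpq hc.symm)]
          simp
      · -- new phone: a fresh singleton group is appended
        have hcont : (xs.foldl pvStep (PySem.Dict.mk [])).contains q = false := by
          rw [show (xs.foldl pvStep (PySem.Dict.mk [])) = PySem.Dict.mk ((pvPhones xs).map (fun p => (p, pvGrp xs p))) from congrArg PySem.Dict.mk ih]
          rw [pvContains_map]; simpa
        rw [if_neg (by simp [hcont])]
        have hins : ((xs.foldl pvStep (PySem.Dict.mk [])).insert q []).items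
            = (pvPhones xs).map (fun p => (p, pvGrp xs p)) ++ [(q, [])] :=
          (pvItems_insert_of_not_contains _ _ _ hcont).trans (by rw [ih])
        have hget : ((xs.foldl pvStep (PySem.Dict.mk [])).insert q []).getD q [] = [] := by
          simp only [PySem.Dict.getD, PySem.Dict.get?, hins, List.find?_append,
            pvFind_map_assoc_none _ (fun p => pvGrp xs p) q hmem]
          simp
        have hcont2 : ((xs.foldl pvStep (PySem.Dict.mk [])).insert q []).contains q = true := by
          simp [PySem.Dict.contains, hins]
        rw [hget, pvItems_insert_of_contains _ _ _ hcont2, hins, List.map_append, List.map_map]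
        rw [show PySem.Set.add (pvPhones xs) q = pvPhones xs ++ [q] by
          simp [PySem.Set.add, PySem.Set.contains, hmem]]
        rw [List.map_append]
        congr 1
        · apply List.map_congr_left
          intro p hp
          have hpq : ¬ p = q := fun hc => hmem (hc ▸ hp)
          simp only [Function.comp_apply]
          rw [if_neg (by simpa using hpq)]
          rw [pvGrp_append, hq, if_neg (by simpa using fun hc => hpq hc.symm)]
          simp
        · simp only [List.map_cons, List.map_nil]
          rw [pvGrp_append, hq, pvGrp_nil_of_not_mem xs q hqne hmem]
          simp
    · -- y has no (truthy) phone: dict unchanged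
      have hty' : pvTruthy (pvItemGet y "phone") = false := by simpa using hty
      have hstep : pvStep (xs.foldl pvStep (PySem.Dict.mk [])) y = xs.foldl pvStep (PySem.Dict.mk []) := by
        simp [pvStep, hty']
      rw [hstep, ih, pvPhones_append_falsy xs y hty']
      apply List.map_congr_left
      intro p hp
      rw [pvGrp_append, pvMatch_falsy y p (pvPhones_ne_empty xs p hp) hty']
      simp

-- stable sort by the 0/1 Google key is the Google/non-Google stable partition
def pvBef (u v : List (String × String)) : Bool :=
  decide ((if pvKeyGoogle u then (0 : Int) else 1) < (if pvKeyGoogle v then (0 : Int) else 1))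

theorem pvBef_false_right (x y : List (String × String)) (hx : pvKeyGoogle x = false) :
    pvBef x y = false := by
  unfold pvBef; by_cases h : pvKeyGoogle y <;> simp [h, hx]

theorem pvInsertG (x : List (String × String)) (hx : pvKeyGoogle x = true) :
    ∀ (a b : List (List (String × String))), (∀ y ∈ a, pvKeyGoogle y = true) →
      (∀ y ∈ b, pvKeyGoogle y = false) →
      PySem.List.insertBy pvBef x (a ++ b) = a ++ x :: b := by
  intro a
  induction a with
  | nil =>
    intro b _ hb
    cases b with
    | nil => simp [PySem.List.insertBy]
    | cons y ys =>
      have hy : pvBef x y = true := by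
        unfold pvBef; simp [hx, hb y (by simp)]
      simp [PySem.List.insertBy, hy]
  | cons z a ih =>
    intro b ha hb
    have hz : pvKeyGoogle z = true := ha z (by simp)
    have hzf : pvBef x z = false := by unfold pvBef; simp [hx, hz]
    simp [PySem.List.insertBy, hzf, ih b (fun y hy => ha y (by simp [hy])) hb]

theorem pvPartFold :
    ∀ (l a b : List (List (String × String))), (∀ y ∈ a, pvKeyGoogle y = true) →
      (∀ y ∈ b, pvKeyGoogle y = false) →
      l.foldl (fun acc x => PySem.List.insertBy pvBef x acc) (a ++ b)
        = (a ++ l.filter (fun x => pvKeyGoogle x)) ++ (b ++ l.filter (fun x => !pvKeyGoogle x)) := by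
  intro l
  induction l with
  | nil => intro a b _ _; simp
  | cons x l ih =>
    intro a b ha hb
    simp only [List.foldl_cons, List.filter_cons]
    by_cases hx : pvKeyGoogle x = true
    · rw [pvInsertG x hx a b ha hb]
      rw [show a ++ x :: b = (a ++ [x]) ++ b by simp]
      rw [ih (a ++ [x]) b
        (by intro y hy; rcases List.mem_append.mp hy with h1 | h1
            · exact ha y h1
            · simp at h1; subst h1; exact hx) hb]
      simp [hx, List.append_assoc]
    · have hx' : pvKeyGoogle x = false := by simpa using hx
      rw [PySem.List.insertBy_of_forall_not_before _ _ _ (fun y _ => pvBef_false_right x y hx')]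
      rw [show (a ++ b) ++ [x] = a ++ (b ++ [x]) by simp]
      rw [ih a (b ++ [x]) ha
        (by intro y hy; rcases List.mem_append.mp hy with h1 | h1
            · exact hb y h1
            · simp at h1; subst h1; exact hx')]
      simp [hx', List.append_assoc]

theorem pvSortSplit (l : List (List (String × String))) :
    PySem.List.sorted l (fun x => if pvKeyGoogle x then (0 : Int) else 1) false
      = l.filter (fun x => pvKeyGoogle x) ++ l.filter (fun x => !pvKeyGoogle x) := by
  have h0 := pvPartFold l [] [] (by simp) (by simp)
  simp only [List.nil_append] at h0
  simp only [PySem.List.sorted, if_neg (by decide : ¬ (false = true))]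
  exact h0

-- B's loop shape: accumulate two appends = flatMap
theorem pvFoldTwo {α β : Type} (f1 f2 : α → List β) (l : List α) (acc : List β) :
    l.foldl (fun res p => res ++ f1 p ++ f2 p) acc = acc ++ l.flatMap (fun p => f1 p ++ f2 p) := by
  induction l generalizing acc with
  | nil => simp
  | cons x xs ih => rw [List.foldl_cons, ih, List.flatMap_cons]; simp [List.append_assoc]

-- ===== VERDICT (by name: the statement is the Claim_ definition above) =====
theorem group_by_phone_spec : Claim_equal_group_by_phone := by
  intro data _ _
  show group_by_phone data = group_by_phone_alt data
  unfold group_by_phone group_by_phone_alt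
  simp only []
  rw [pvFoldSplit, pvItemsLem, List.nil_append]
  rw [PySem.List.foldl_append_eq_flatMap
    (g := fun pr : String × List (List (String × String)) =>
      PySem.List.sorted pr.2 (fun x => if pvKeyGoogle x then (0 : Int) else 1) false)]
  rw [pvFoldTwo]
  rw [List.flatMap_map]
  simp only [pvSortSplit, List.nil_append]
  rfl
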